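-- pv_equiv track=rewrite | github.com/SindromRadioSpb/Hebrew-NLP-Pipeline | kadima/engine/transliterator.py | _transliterate_to_hebrew
-- ===== SOURCE A (Python) =====
-- from typing import Any, Dict, List
--
-- _LATIN_TO_HE: Dict[str, str] = {
--     "a": "א", "b": "ב", "c": "ק", "d": "ד", "e": "א",
--     "f": "פ", "g": "ג", "h": "ה", "i": "י", "j": "ג",
--     "k": "ק", "l": "ל", "m": "מ", "n": "נ", "o": "או",
--     "p": "פ", "q": "ק", "r": "ר", "s": "ס", "t": "ט",
--     "u": "או", "v": "ב", "w": "ו", "x": "קס", "y": "י",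
--     "z": "ז",
-- }
--
-- _LATIN_DIGRAPHS_TO_HE: Dict[str, str] = {
--     "sh": "ש", "ch": "ח", "kh": "כ", "ts": "צ", "tz": "צ",
--     "th": "ת", "ph": "פ",
-- }
--
-- def _transliterate_to_hebrew(text: str) -> str:
--     """Latin → Hebrew reverse transliteration (best-effort)."""
--     result = []
--     i = 0
--     lower = text.lower()
--     while i < len(lower):
--         # Try digraphs first
--         matched = False
--         if i + 1 < len(lower):
--             digraph = lower[i:i + 2]
--             if digraph in _LATIN_DIGRAPHS_TO_HE:
--                 result.append(_LATIN_DIGRAPHS_TO_HE[digraph])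
--                 i += 2
--                 matched = True
--
--         if not matched:
--             ch = lower[i]
--             if ch in _LATIN_TO_HE:
--                 result.append(_LATIN_TO_HE[ch])
--             else:
--                 result.append(ch)
--             i += 1
--
--     return "".join(result)
-- ===== SOURCE B (Python) =====
-- from typing import Any, Dict, List
--
-- _LATIN_TO_HE: Dict[str, str] = {
--     "a": "א", "b": "ב", "c": "ק", "d": "ד", "e": "א",
--     "f": "פ", "g": "ג", "h": "ה", "i": "י", "j": "ג",
--     "k": "ק", "l": "ל", "m": "מ", "n": "נ", "o": "או",
--     "p": "פ", "q": "ק", "r": "ר", "s": "ס", "t": "ט",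
--     "u": "או", "v": "ב", "w": "ו", "x": "קס", "y": "י",
--     "z": "ז",
-- }
--
-- _LATIN_DIGRAPHS_TO_HE: Dict[str, str] = {
--     "sh": "ש", "ch": "ח", "kh": "כ", "ts": "צ", "tz": "צ",
--     "th": "ת", "ph": "פ",
-- }
--
--
-- def _transliterate_to_hebrew(text: str) -> str:
--     """Latin → Hebrew reverse transliteration (best-effort)."""
--     lower = text.lower()
--     # Pass 1: jump table — for EVERY position, its Hebrew token and next position.
--     step = []
--     for i, ch in enumerate(lower):
--         key = ch + lower[i + 1:i + 2]
--         if key in _LATIN_DIGRAPHS_TO_HE: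
--             step.append((_LATIN_DIGRAPHS_TO_HE[key], i + 2))
--         else:
--             step.append((_LATIN_TO_HE.get(ch, ch), i + 1))
--     # Pass 2: follow the chain from position 0, collecting tokens.
--     pieces = []
--     i = 0
--     while i < len(step):
--         tok, i = step[i]
--         pieces.append(tok)
--     return "".join(pieces)
-- ===== Notes on version B (the rewrite author's own statement) =====
-- stated objective: alternative
-- what changed: B is a two-stage algorithm: a first pass precomputes a jump table giving every position its Hebrew token and next position, and a second pass follows the chain from position 0 and joins the collected tokens, instead of A's single greedy while-loop with slicing and a matched flag.
import Mathlib
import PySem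

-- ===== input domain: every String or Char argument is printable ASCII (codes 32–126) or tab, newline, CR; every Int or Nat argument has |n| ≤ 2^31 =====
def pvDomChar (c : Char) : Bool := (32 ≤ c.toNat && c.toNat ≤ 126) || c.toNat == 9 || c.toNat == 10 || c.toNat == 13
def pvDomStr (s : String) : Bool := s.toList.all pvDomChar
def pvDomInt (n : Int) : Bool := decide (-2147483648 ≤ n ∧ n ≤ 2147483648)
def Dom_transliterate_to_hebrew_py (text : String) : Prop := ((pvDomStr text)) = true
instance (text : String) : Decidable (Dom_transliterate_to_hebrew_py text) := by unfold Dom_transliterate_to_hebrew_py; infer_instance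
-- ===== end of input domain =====

-- B replaces A's single greedy while-loop by two staged passes: a precomputed jump table
-- (token, next position) for every position, then a chain walk from 0 (alternative, same cost).

-- ===== PORT A =====
-- shared module-level constants (_LATIN_TO_HE keyed by single chars, _LATIN_DIGRAPHS_TO_HE by 2-char strings as List Char)
def pvLatin : PySem.Dict Char String :=
  PySem.Dict.ofList [('a', "א"), ('b', "ב"), ('c', "ק"), ('d', "ד"), ('e', "א"),
   ('f', "פ"), ('g', "ג"), ('h', "ה"), ('i', "י"), ('j', "ג"),
   ('k', "ק"), ('l', "ל"), ('m', "מ"), ('n', "נ"), ('o', "או"),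
   ('p', "פ"), ('q', "ק"), ('r', "ר"), ('s', "ס"), ('t', "ט"),
   ('u', "או"), ('v', "ב"), ('w', "ו"), ('x', "קס"), ('y', "י"),
   ('z', "ז")]

def pvDigraphs : PySem.Dict (List Char) String :=
  PySem.Dict.ofList [(['s','h'], "ש"), (['c','h'], "ח"), (['k','h'], "כ"), (['t','s'], "צ"),
   (['t','z'], "צ"), (['t','h'], "ת"), (['p','h'], "פ")]

-- A's while-loop: index i into lower, digraph slice lower[i:i+2] tried first, boolean match flag
def pvALoop (lower : List Char) (i : Nat) (result : List String) : List String :=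
  if h : i < lower.length then
    let matched : Option String :=
      if i + 1 < lower.length then
        PySem.Dict.get? pvDigraphs (PySem.List.slice lower (some (i : Int)) (some ((i : Int) + 2)))
      else none
    match matched with
    | some v => pvALoop lower (i + 2) (result ++ [v])
    | none =>
      let ch := lower[i]
      match PySem.Dict.get? pvLatin ch with
      | some v => pvALoop lower (i + 1) (result ++ [v])
      | none => pvALoop lower (i + 1) (result ++ [String.ofList [ch]])
  else result
termination_by lower.length - i

def transliterate_to_hebrew_py (text : String) : String :=
  PySem.Str.join "" (pvALoop (PySem.Str.lower text).toList 0 [])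

-- ===== PORT B =====
-- pass 1 body: for (i, ch) in enumerate(lower): key = ch + lower[i+1:i+2]; …
def pvEntry (lower : List Char) (p : Int × Char) : String × Int :=
  let key := p.2 :: PySem.List.slice lower (some (p.1 + 1)) (some (p.1 + 2))
  match PySem.Dict.get? pvDigraphs key with
  | some v => (v, p.1 + 2)
  | none => ((PySem.Dict.get? pvLatin p.2).getD (String.ofList [p.2]), p.1 + 1)

-- pass 2: while i < len(step): tok, i = step[i]; pieces.append(tok)
-- (fuel only makes the loop total; with fuel = len(step) it is never exhausted, since i strictly increases)
def pvWalk (step : List (String × Int)) (n : Int) : Nat → Int → List String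
  | 0, _ => []
  | fuel + 1, i =>
    if i < n then
      match PySem.List.pyGet? step i with
      | some (tok, j) => tok :: pvWalk step n fuel j
      | none => []
    else []

-- the two passes on lower = text.lower() (split out so the let stays readable in proofs)
def pvJoinWalk (lower : List Char) : String :=
  let step := (PySem.List.enumerate lower 0).map (pvEntry lower)
  PySem.Str.join "" (pvWalk step (step.length : Int) step.length 0)

def transliterate_to_hebrew_py_alt (text : String) : String :=
  pvJoinWalk ((PySem.Str.lower text).toList)

-- ===== PRECONDITION & SPEC =====
def Spec_transliterate_to_hebrew_py (text : String) (out : String) : Prop := out = transliterate_to_hebrew_py_alt text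
instance (text : String) (out : String) : Decidable (Spec_transliterate_to_hebrew_py text out) := by unfold Spec_transliterate_to_hebrew_py; infer_instance

-- ===== CLAIM (what is proved, stated in full; the proofs are below) =====
def Claim_equal_transliterate_to_hebrew_py : Prop := ∀ (text : String), Dom_transliterate_to_hebrew_py text → Spec_transliterate_to_hebrew_py text (transliterate_to_hebrew_py text)

-- ===== LEMMAS AND PROOFS =====

-- common reference: the token list of a suffix (proof-side only; used by neither port)
def pvSingle (c : Char) : String := (PySem.Dict.get? pvLatin c).getD (String.ofList [c])

def pvTokens : List Char → List String
  | [] => []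
  | [c] => [pvSingle c]
  | c1 :: c2 :: rest =>
    match PySem.Dict.get? pvDigraphs [c1, c2] with
    | some v => v :: pvTokens rest
    | none => pvSingle c1 :: pvTokens (c2 :: rest)

-- a one-character key is in no digraph entry
lemma pvDigraphs_single (c : Char) : PySem.Dict.get? pvDigraphs [c] = none := by
  have h : pvDigraphs = PySem.Dict.mk [(['s','h'], "ש"), (['c','h'], "ח"), (['k','h'], "כ"),
      (['t','s'], "צ"), (['t','z'], "צ"), (['t','h'], "ת"), (['p','h'], "פ")] := rfl
  simp [h, PySem.Dict.get?]

-- A's loop from index i produces exactly the tokens of the remaining suffix, appended to the accumulator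
lemma pvALoop_eq (lower : List Char) (i : Nat) (result : List String) :
    pvALoop lower i result = result ++ pvTokens (lower.drop i) := by
  fun_induction pvALoop lower i result with
  | case1 i result h matched v hv ih =>
    rw [ih]
    have hv' : (if i + 1 < lower.length then
        PySem.Dict.get? pvDigraphs (PySem.List.slice lower (some (i : Int)) (some ((i : Int) + 2)))
      else none) = some v := hv
    by_cases h2 : i + 1 < lower.length
    · rw [if_pos h2] at hv'
      have hd : lower.drop i = lower[i] :: lower[i+1] :: lower.drop (i+2) := by
        rw [List.drop_eq_getElem_cons h, List.drop_eq_getElem_cons h2]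
      have hs : PySem.List.slice lower (some (i : Int)) (some ((i : Int) + 2))
          = [lower[i], lower[i+1]] := by
        rw [show ((i : Int) + 2) = ((i + 2 : Nat) : Int) by push_cast; ring]
        rw [PySem.List.slice_toNat _ (by positivity) (by positivity)]
        simp only [Int.toNat_natCast]
        rw [hd, show i + 2 - i = 2 from by omega]
        rfl
      rw [hs] at hv'
      rw [hd]
      simp [pvTokens, hv']
    · rw [if_neg h2] at hv'
      simp at hv'
  | case2 i result h matched hm ch v hv ih =>
    rw [ih]
    have hv' : PySem.Dict.get? pvLatin lower[i] = some v := hv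
    rcases Nat.lt_or_ge (i+1) lower.length with h2 | h2
    · have hm' : (if i + 1 < lower.length then
          PySem.Dict.get? pvDigraphs (PySem.List.slice lower (some (i : Int)) (some ((i : Int) + 2)))
        else none) = none := hm
      rw [if_pos h2] at hm'
      have hd2 : lower.drop i = lower[i] :: lower[i+1] :: lower.drop (i+2) := by
        rw [List.drop_eq_getElem_cons h, List.drop_eq_getElem_cons h2]
      have hs : PySem.List.slice lower (some (i : Int)) (some ((i : Int) + 2))
          = [lower[i], lower[i+1]] := by
        rw [show ((i : Int) + 2) = ((i + 2 : Nat) : Int) by push_cast; ring]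
        rw [PySem.List.slice_toNat _ (by positivity) (by positivity)]
        simp only [Int.toNat_natCast]
        rw [hd2, show i + 2 - i = 2 from by omega]
        rfl
      rw [hs] at hm'
      rw [hd2, show lower.drop (i+1) = lower[i+1] :: lower.drop (i+2) from
            List.drop_eq_getElem_cons h2]
      simp [pvTokens, hm', pvSingle, hv']
    · have hd1 : lower.drop (i+1) = [] := List.drop_eq_nil_of_le h2
      rw [List.drop_eq_getElem_cons h, hd1]
      simp [pvTokens, pvSingle, hv']
  | case3 i result h matched hm ch hv ih =>
    rw [ih]
    have hv' : PySem.Dict.get? pvLatin lower[i] = none := hv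
    rcases Nat.lt_or_ge (i+1) lower.length with h2 | h2
    · have hm' : (if i + 1 < lower.length then
          PySem.Dict.get? pvDigraphs (PySem.List.slice lower (some (i : Int)) (some ((i : Int) + 2)))
        else none) = none := hm
      rw [if_pos h2] at hm'
      have hd2 : lower.drop i = lower[i] :: lower[i+1] :: lower.drop (i+2) := by
        rw [List.drop_eq_getElem_cons h, List.drop_eq_getElem_cons h2]
      have hs : PySem.List.slice lower (some (i : Int)) (some ((i : Int) + 2))
          = [lower[i], lower[i+1]] := by
        rw [show ((i : Int) + 2) = ((i + 2 : Nat) : Int) by push_cast; ring]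
        rw [PySem.List.slice_toNat _ (by positivity) (by positivity)]
        simp only [Int.toNat_natCast]
        rw [hd2, show i + 2 - i = 2 from by omega]
        rfl
      rw [hs] at hm'
      rw [hd2, show lower.drop (i+1) = lower[i+1] :: lower.drop (i+2) from
            List.drop_eq_getElem_cons h2]
      simp [pvTokens, hm', pvSingle, hv']
      rfl
    · have hd1 : lower.drop (i+1) = [] := List.drop_eq_nil_of_le h2
      rw [List.drop_eq_getElem_cons h, hd1]
      simp [pvTokens, pvSingle, hv']
      rfl
  | case4 i result h =>
    rw [List.drop_eq_nil_of_le (Nat.le_of_not_lt h)]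
    simp [pvTokens]

-- the table entry at a valid position i is exactly the local greedy decision
lemma pvStep_get (lower : List Char) (i : Nat) (h : i < lower.length) :
    PySem.List.pyGet? ((PySem.List.enumerate lower 0).map (pvEntry lower)) (i : Int)
      = some (pvEntry lower ((i : Int), lower[i])) := by
  rw [PySem.List.pyGet?_natCast]
  simp [PySem.List.getElem?_enumerate, List.getElem?_eq_getElem h]

-- B's chain walk from position i yields the tokens of the suffix, given enough fuel
lemma pvWalk_eq (lower : List Char) (fuel i : Nat) (hfuel : lower.length - i ≤ fuel) :
    pvWalk ((PySem.List.enumerate lower 0).map (pvEntry lower))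
        (((PySem.List.enumerate lower 0).map (pvEntry lower)).length : Int) fuel (i : Int)
      = pvTokens (lower.drop i) := by
  induction fuel generalizing i with
  | zero =>
    have : lower.length ≤ i := by omega
    rw [List.drop_eq_nil_of_le this]
    simp [pvWalk, pvTokens]
  | succ f ih =>
    have hlen : ((PySem.List.enumerate lower 0).map (pvEntry lower)).length = lower.length := by
      simp [PySem.List.length_enumerate]
    by_cases h : i < lower.length
    · rw [pvWalk, if_pos (by rw [hlen]; exact_mod_cast h), pvStep_get lower i h]
      rcases Nat.lt_or_ge (i+1) lower.length with h2 | h2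
      · have hd : lower.drop i = lower[i] :: lower[i+1] :: lower.drop (i+2) := by
          rw [List.drop_eq_getElem_cons h, List.drop_eq_getElem_cons h2]
        have hs : PySem.List.slice lower (some ((i : Int) + 1)) (some ((i : Int) + 2))
            = [lower[i+1]] := by
          rw [show ((i : Int) + 1) = ((i + 1 : Nat) : Int) by push_cast; ring,
              show ((i : Int) + 2) = ((i + 2 : Nat) : Int) by push_cast; ring]
          rw [PySem.List.slice_toNat _ (by positivity) (by positivity)]
          simp only [Int.toNat_natCast]
          rw [List.drop_eq_getElem_cons h2, show i + 2 - (i + 1) = 1 from by omega]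
          rfl
        cases hdg : PySem.Dict.get? pvDigraphs [lower[i], lower[i+1]] with
        | some v =>
          have he : pvEntry lower ((i : Int), lower[i]) = (v, ((i + 2 : Nat) : Int)) := by
            simp [pvEntry, hs, hdg]
          rw [he]
          simp only [ih (i+2) (by omega)]
          rw [hd]
          simp [pvTokens, hdg]
        | none =>
          have he : pvEntry lower ((i : Int), lower[i])
              = (pvSingle lower[i], ((i + 1 : Nat) : Int)) := by
            simp [pvEntry, hs, hdg, pvSingle]
          rw [he]
          simp only [ih (i+1) (by omega)]
          rw [hd, show lower.drop (i+1) = lower[i+1] :: lower.drop (i+2) from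
                List.drop_eq_getElem_cons h2]
          simp [pvTokens, hdg]
      · have hd : lower.drop i = [lower[i]] := by
          rw [List.drop_eq_getElem_cons h, List.drop_eq_nil_of_le h2]
        have hs : PySem.List.slice lower (some ((i : Int) + 1)) (some ((i : Int) + 2)) = [] := by
          rw [show ((i : Int) + 1) = ((i + 1 : Nat) : Int) by push_cast; ring,
              show ((i : Int) + 2) = ((i + 2 : Nat) : Int) by push_cast; ring]
          rw [PySem.List.slice_toNat _ (by positivity) (by positivity)]
          simp only [Int.toNat_natCast]
          rw [List.drop_eq_nil_of_le h2]
          simp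
        have he : pvEntry lower ((i : Int), lower[i])
            = (pvSingle lower[i], ((i + 1 : Nat) : Int)) := by
          simp [pvEntry, hs, pvDigraphs_single, pvSingle]
        rw [he]
        simp only [ih (i+1) (by omega)]
        rw [List.drop_eq_nil_of_le h2, hd]
        simp [pvTokens]
    · rw [List.drop_eq_nil_of_le (Nat.le_of_not_lt h)]
      rw [pvWalk, if_neg (by rw [hlen]; exact_mod_cast h)]
      simp [pvTokens]

-- ===== VERDICT (by name: the statement is the Claim_ definition above) =====
theorem transliterate_to_hebrew_py_spec : Claim_equal_transliterate_to_hebrew_py := by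
  intro text _
  unfold Spec_transliterate_to_hebrew_py transliterate_to_hebrew_py transliterate_to_hebrew_py_alt
    pvJoinWalk
  rw [pvALoop_eq]
  show PySem.Str.join "" ([] ++ pvTokens ((PySem.Str.lower text).toList.drop 0))
      = PySem.Str.join "" (pvWalk
          ((PySem.List.enumerate (PySem.Str.lower text).toList 0).map
            (pvEntry (PySem.Str.lower text).toList))
          ((((PySem.List.enumerate (PySem.Str.lower text).toList 0).map
            (pvEntry (PySem.Str.lower text).toList)).length : Nat) : Int)
          ((PySem.List.enumerate (PySem.Str.lower text).toList 0).map
            (pvEntry (PySem.Str.lower text).toList)).length (((0 : Nat) : Int)))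
  rw [pvWalk_eq (PySem.Str.lower text).toList _ 0
        (by simp [PySem.List.length_enumerate])]
  simp
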